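-- pv_equiv track=rewrite | github.com/FocusedConsistency/challenges-dailies | FCC_2026-02-14.py | get_difficulty
-- ===== SOURCE A (Python) =====
-- def get_difficulty(track):
--     if not track:
--         raise ValueError("No track provided")
--
--     score = 0
--     if track[0] in 'LR':
--         score += 5
--     for prev, curr in zip(track, track[1:]):
--         if curr in 'LR':
--             score += 5
--             if prev != curr and prev in 'LR':
--                 score += 10
--     if score > 200:
--         return "Hard"
--     if score > 100:
--         return "Medium"
--     return "Easy"
-- ===== SOURCE B (Python) =====
-- def get_difficulty(track):
--     if not track:
--         raise ValueError("No track provided")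
--     # run-length encode the track into maximal runs of equal characters
--     runs = []
--     cur, cnt = track[0], 1
--     for ch in track[1:]:
--         if ch == cur:
--             cnt += 1
--         else:
--             runs.append((cur, cnt))
--             cur, cnt = ch, 1
--     runs.append((cur, cnt))
--     # score the runs: 5 per char of a special run, 10 per adjacent pair of
--     # special runs (adjacent runs always have distinct characters)
--     score = 0
--     prev_special = False
--     for c, n in runs:
--         if c in 'LR':
--             score += 5 * n
--             if prev_special:
--                 score += 10
--             prev_special = True
--         else:
--             prev_special = False
--     if score > 200:
--         return "Hard"
--     if score > 100:
--         return "Medium"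
--     return "Easy"
-- ===== Notes on version B (the rewrite author's own statement) =====
-- stated objective: alternative
-- what changed: Run-length encodes the track into maximal runs, then scores runs: 5 per character of an L/R run and 10 per adjacent pair of L/R runs (adjacent runs always differ), replacing A's fused per-character loop with first-character special case.
import Mathlib
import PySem

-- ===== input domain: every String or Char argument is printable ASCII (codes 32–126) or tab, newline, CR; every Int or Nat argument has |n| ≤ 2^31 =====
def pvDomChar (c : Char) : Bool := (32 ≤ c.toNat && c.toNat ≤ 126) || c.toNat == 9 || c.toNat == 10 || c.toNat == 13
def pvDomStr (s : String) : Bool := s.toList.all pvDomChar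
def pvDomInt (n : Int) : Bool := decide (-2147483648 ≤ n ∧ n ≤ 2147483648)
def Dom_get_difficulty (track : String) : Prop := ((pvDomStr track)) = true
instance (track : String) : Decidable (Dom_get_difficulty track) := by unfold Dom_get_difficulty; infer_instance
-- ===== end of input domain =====

-- B run-length encodes the track and scores the runs (5 per char of an L/R run,
-- 10 per adjacent pair of L/R runs), replacing A's fused per-character loop: alternative algorithm, same cost.


-- ===== PORT A =====
-- 'c in "LR"'
def pvInLR (c : Char) : Bool := c = 'L' || c = 'R'

-- Literal port of A. Python raises ValueError on the empty track (excluded by Pre_);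
-- track[0] is rendered headD (exact on nonempty tracks).
def get_difficulty (track : String) : String :=
  let cs := track.toList
  let score0 : Int := if pvInLR (cs.headD ' ') then 5 else 0
  let score : Int := (cs.zip cs.tail).foldl
    (fun s pc =>
      if pvInLR pc.2 then
        let s := s + 5
        if pc.1 != pc.2 && pvInLR pc.1 then s + 10 else s
      else s) score0
  if score > 200 then "Hard"
  else if score > 100 then "Medium"
  else "Easy"

-- ===== PORT B =====
-- Port of B (Source B): run-length encode, then score the runs. B also raises on the
-- empty track (excluded by Pre_); track[0] is rendered headD (exact on nonempty tracks).
def get_difficulty_alt (track : String) : String :=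
  let cs := track.toList
  -- run-length encode: state (runs, cur, cnt)
  let st := cs.tail.foldl
    (fun (st : List (Char × Int) × Char × Int) ch =>
      if ch = st.2.1 then (st.1, st.2.1, st.2.2 + 1)
      else (st.1 ++ [(st.2.1, st.2.2)], ch, 1))
    ([], cs.headD ' ', 1)
  let runs := st.1 ++ [(st.2.1, st.2.2)]
  -- score the runs: state (score, prev_special)
  let res := runs.foldl
    (fun (acc : Int × Bool) r =>
      if pvInLR r.1 then
        (acc.1 + 5 * r.2 + (if acc.2 then 10 else 0), true)
      else (acc.1, false))
    (0, false)
  if res.1 > 200 then "Hard"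
  else if res.1 > 100 then "Medium"
  else "Easy"

-- ===== PRECONDITION & SPEC =====
-- Pre_ excludes exactly the empty track, on which Python A raises ValueError.
def Pre_get_difficulty (track : String) : Prop := track ≠ ""
instance (track : String) : Decidable (Pre_get_difficulty track) := by unfold Pre_get_difficulty; infer_instance
def pvWitness_get_difficulty : String := "LRL"

def Spec_get_difficulty (track : String) (out : String) : Prop := out = get_difficulty_alt track
instance (track : String) (out : String) : Decidable (Spec_get_difficulty track out) := by unfold Spec_get_difficulty; infer_instance

-- ===== CLAIM (what is proved, stated in full; the proofs are below) =====
def Claim_equal_get_difficulty : Prop := ∀ (track : String), Dom_get_difficulty track → Pre_get_difficulty track → Spec_get_difficulty track (get_difficulty track)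

-- ===== LEMMAS AND PROOFS =====

-- A's zip-fold, recast as structural recursion carrying the previous character.
def pvARec (s : Int) (prev : Char) : List Char → Int
  | [] => s
  | c :: t =>
      pvARec (if pvInLR c then
                (if prev != c && pvInLR prev then s + 5 + 10 else s + 5)
              else s) c t

theorem pvA_fold_eq (t : List Char) : ∀ (h : Char) (s : Int),
    ((h :: t).zip t).foldl
      (fun s pc =>
        if pvInLR pc.2 then
          let s := s + 5
          if pc.1 != pc.2 && pvInLR pc.1 then s + 10 else s
        else s) s = pvARec s h t := by
  induction t with
  | nil => intro h s; simp [pvARec]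
  | cons x t' ih =>
      intro h s
      simp only [List.zip_cons_cons, List.foldl_cons, pvARec]
      rw [ih]

-- the run list B's first loop produces, as a structural recursion
def pvRle : List Char → Char → Int → List (Char × Int)
  | [], cur, cnt => [(cur, cnt)]
  | ch :: t, cur, cnt =>
      if ch = cur then pvRle t cur (cnt + 1) else (cur, cnt) :: pvRle t ch 1

theorem pvRle_fold (t : List Char) : ∀ (runs : List (Char × Int)) (cur : Char) (cnt : Int),
    (let st := t.foldl
        (fun (st : List (Char × Int) × Char × Int) ch =>
          if ch = st.2.1 then (st.1, st.2.1, st.2.2 + 1)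
          else (st.1 ++ [(st.2.1, st.2.2)], ch, 1))
        (runs, cur, cnt)
     st.1 ++ [(st.2.1, st.2.2)]) = runs ++ pvRle t cur cnt := by
  induction t with
  | nil => intro runs cur cnt; simp [pvRle]
  | cons ch t' ih =>
      intro runs cur cnt
      simp only [List.foldl_cons, pvRle]
      by_cases h : ch = cur
      · simp only [h]; exact ih runs cur (cnt + 1)
      · simp only [if_neg h]
        rw [ih (runs ++ [(cur, cnt)]) ch 1]
        simp

-- the pending contribution of the current (unfinished) run
def pvContr (cur : Char) (cnt : Int) (psp : Bool) : Int :=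
  if pvInLR cur then 5 * cnt + (if psp then 10 else 0) else 0

-- bridge: B's run-scoring fold over the RLE equals A's per-character recursion
theorem pvBridge (t : List Char) : ∀ (cur : Char) (cnt : Int) (s : Int) (psp : Bool),
    ((pvRle t cur cnt).foldl
      (fun (acc : Int × Bool) r =>
        if pvInLR r.1 then
          (acc.1 + 5 * r.2 + (if acc.2 then 10 else 0), true)
        else (acc.1, false))
      (s, psp)).1 = pvARec (s + pvContr cur cnt psp) cur t := by
  induction t with
  | nil =>
      intro cur cnt s psp
      by_cases h1 : pvInLR cur <;> by_cases h2 : psp <;>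
        simp [pvRle, pvARec, pvContr, h1, h2] <;> ring
  | cons ch t' ih =>
      intro cur cnt s psp
      simp only [pvRle]
      by_cases h : ch = cur
      · rw [if_pos h]
        rw [ih cur (cnt + 1) s psp]
        simp only [pvARec, pvContr]
        subst h
        split_ifs with h1 h2 <;> simp_all <;> ring_nf
      · simp only [if_neg h, List.foldl_cons]
        by_cases hc : pvInLR cur
        · rw [if_pos hc]
          rw [ih ch 1 (s + 5 * cnt + (if psp then 10 else 0)) true]
          simp only [pvARec, pvContr, hc, if_pos]
          have hne : cur != ch := bne_iff_ne.mpr (fun e => h e.symm)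
          split_ifs with h1 h2 <;> simp_all <;> ring_nf
        · rw [if_neg hc]
          rw [ih ch 1 s false]
          simp only [pvARec, pvContr, hc]
          split_ifs with h1 h2 <;> simp_all

theorem pv_main (track : String) (hne : track.toList ≠ []) :
    get_difficulty track = get_difficulty_alt track := by
  unfold get_difficulty get_difficulty_alt
  obtain ⟨h, t, hc⟩ : ∃ h t, track.toList = h :: t := by
    cases hh : track.toList with
    | nil => exact absurd hh hne
    | cons a b => exact ⟨a, b, rfl⟩
  simp only [hc, List.tail_cons, List.headD_cons]
  rw [pvA_fold_eq]
  have hr := pvRle_fold t [] h 1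
  simp only [List.nil_append] at hr
  simp only [hr, pvBridge t h 1 0 false, pvContr]
  have heq : (0 : Int) + (if pvInLR h then 5 * 1 + (if false then 10 else 0) else 0)
       = (if pvInLR h then (5 : Int) else 0) := by by_cases hh : pvInLR h <;> simp [hh]
  rw [heq]

-- ===== VERDICT (by name: the statement is the Claim_ definition above) =====
theorem get_difficulty_spec : Claim_equal_get_difficulty := by
  intro track _ hpre
  unfold Spec_get_difficulty
  exact pv_main track (fun h => hpre (String.toList_eq_nil_iff.mp h))
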